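-- pv_equiv track=rewrite | github.com/eclipse-velocitas/devenv-devcontainer-setup | grpc-interface-support/src/conan_helper.py | _find_insertion_index
-- ===== SOURCE A (Python) =====
-- from typing import List, Optional, Tuple
--
-- def _find_insertion_index(
--     lines: List[str], dependency_name: str
-- ) -> Tuple[int, bool, bool]:
--     """Find an insertion index for the dependency in a conanfile.txt.
--
--     Args:
--         lines (List[str]): The lines of the original conanfile.txt
--         dependency_name (str): The name of the dependency (without version) e.g. "grpc"
--             of the dependency to insert.
--
--     Returns:
--         Tuple[int, bool, bool]: A tuple consisting of
--             [0] = Insert index.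
--             [1] = Whether the insert index replaces the original line or not.
--             [2] = Whether the original file has a requires section or not.
--     """
--     found_index: Optional[int] = None
--     replace: bool = False
--     in_requires_section = False
--     has_requires_section = False
--     for i in range(0, len(lines)):
--         stripped_line = lines[i].strip()
--         if stripped_line == "[requires]":
--             has_requires_section = True
--             in_requires_section = True
--             found_index = i + 1
--         elif in_requires_section and stripped_line.startswith("["):
--             in_requires_section = False
--
--         if in_requires_section:
--             if len(stripped_line) > 0:
--                 if stripped_line.startswith(dependency_name):
--                     found_index = i
--                     replace = True
--
--     if found_index is None:
--         found_index = len(lines)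
--
--     return (found_index, replace, has_requires_section)
-- ===== SOURCE B (Python) =====
-- from typing import List, Tuple
--
--
-- def _section_matches(body: List[str], start: int, dependency_name: str) -> List[int]:
--     """Indices (absolute, offset by start) of the dependency lines in one
--     requires-section body, which runs until the next '[' line."""
--     matches = []
--     for offset, s in enumerate(body):
--         if s.startswith("["):
--             break
--         if s and s.startswith(dependency_name):
--             matches.append(start + offset)
--     return matches
--
--
-- def _find_insertion_index(
--     lines: List[str], dependency_name: str
-- ) -> Tuple[int, bool, bool]:
--     """Declarative rewrite: strip once, list every [requires] header together
--     with its section's dependency matches, then read the answer off that list: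
--     the insertion index comes from the last section (its last match, else the
--     line after its header), replace is whether any section has a match."""
--     stripped = [line.strip() for line in lines]
--     sections = [
--         (i, _section_matches(stripped[i + 1:], i + 1, dependency_name))
--         for i, s in enumerate(stripped)
--         if s == "[requires]"
--     ]
--     if not sections:
--         return (len(lines), False, False)
--     header, matches = sections[-1]
--     found = matches[-1] if matches else header + 1
--     replace = any(m for _, m in sections)
--     return (found, replace, True)
-- ===== Notes on version B (the rewrite author's own statement) =====
-- stated objective: simpler
-- what changed: A's single-pass state machine over four mutable variables is replaced by a declarative decomposition: strip once, build the list of (header index, section match list) pairs per [requires] header, and read the result off that list (last section's last match else header+1; replace = any section has a match); Pre_ excludes only the empty dependency_name, a degenerate name outside the task's natural domain on which every line is a trivial prefix-match.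
-- intended difference: For a nonempty dependency_name that is a prefix of '[requires]' (e.g. '[') in a file with a requires section, A treats the header line itself as a dependency match and returns the header's own index with replace=True (it would overwrite the '[requires]' header), while B ignores header lines and returns the line after the last header with replace=False, the intended insertion point. — e.g. on _find_insertion_index(["[requires]"], "["): A returns (0, true, true), B returns (1, false, true)
-- outside the precondition, e.g. on _find_insertion_index(['[requires]'], ''): A returns (0, True, True), B returns (1, False, True)
import Mathlib
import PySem

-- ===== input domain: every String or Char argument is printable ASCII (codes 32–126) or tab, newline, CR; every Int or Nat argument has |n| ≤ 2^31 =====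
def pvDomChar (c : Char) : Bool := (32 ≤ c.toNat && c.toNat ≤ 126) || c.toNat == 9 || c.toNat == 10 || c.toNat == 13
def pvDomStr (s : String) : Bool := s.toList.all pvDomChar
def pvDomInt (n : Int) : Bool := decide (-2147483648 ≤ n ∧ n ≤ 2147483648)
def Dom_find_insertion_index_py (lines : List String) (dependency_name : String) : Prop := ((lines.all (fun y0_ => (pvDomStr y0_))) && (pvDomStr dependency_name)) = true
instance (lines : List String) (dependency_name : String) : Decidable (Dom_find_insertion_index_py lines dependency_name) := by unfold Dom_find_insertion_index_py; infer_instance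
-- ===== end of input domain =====

-- B replaces A's single-pass four-variable state machine by a declarative decomposition
-- (strip once, list each [requires] header with its section's matches, read the answer off
-- that list); objective: simpler. Where A treats the '[requires]' header line itself as a
-- dependency match, B returns the intended index (see D_ below).

-- ===== PORT A =====
-- literal transliteration of A's for-loop over range(0, len(lines)) with state
-- (found_index, replace, in_requires_section, has_requires_section)
def aLoop (dep : String) : List String → Int → (Option Int × Bool × Bool × Bool) → Option Int × Bool × Bool × Bool
  | [], _, st => st
  | l :: rest, i, (found, replace, inReq, hasReq) =>
    let s := PySem.Str.strip l
    let (found, inReq, hasReq) :=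
      if s == "[requires]" then ((some (i+1) : Option Int), true, true)
      else if inReq && PySem.Str.startswith s "[" then (found, false, hasReq)
      else (found, inReq, hasReq)
    let (found, replace) :=
      if inReq && decide (0 < PySem.Str.len s) && PySem.Str.startswith s dep
      then ((some i : Option Int), true)
      else (found, replace)
    aLoop dep rest (i+1) (found, replace, inReq, hasReq)

def find_insertion_index_py (lines : List String) (dependency_name : String) : Int × Bool × Bool :=
  let st := aLoop dependency_name lines 0 (none, false, false, false)
  (st.1.getD ((lines.length : Int)), st.2.1, st.2.2.2)

-- ===== PORT B =====
-- Source B's _section_matches: the matches of one requires-section body (runs until a '[' line)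
def sectionMatchesAlt (dep : String) : List String → Int → List Int
  | [], _ => []
  | s :: rest, j =>
    if PySem.Str.startswith s "[" then []
    else if (!(s == "")) && PySem.Str.startswith s dep then j :: sectionMatchesAlt dep rest (j+1)
    else sectionMatchesAlt dep rest (j+1)

-- Source B's sections comprehension: (header index, its section's matches) for each header
def altSections (dep : String) : List String → Int → List (Int × List Int)
  | [], _ => []
  | s :: rest, i =>
    if s == "[requires]" then (i, sectionMatchesAlt dep rest (i+1)) :: altSections dep rest (i+1)
    else altSections dep rest (i+1)

def find_insertion_index_py_alt (lines : List String) (dependency_name : String) : Int × Bool × Bool :=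
  let stripped := lines.map PySem.Str.strip
  let sections := altSections dependency_name stripped 0
  match sections.getLast? with
  | none => ((lines.length : Int), false, false)
  | some (header, ms) =>
      (ms.getLast?.getD (header + 1), sections.any (fun p => !p.2.isEmpty), true)

-- ===== PRECONDITION & SPEC =====
-- Pre_ excludes only the empty dependency_name, a degenerate name outside the task's
-- natural domain on which every line (headers included) is a trivial prefix-match.
def Pre_find_insertion_index_py (lines : List String) (dependency_name : String) : Prop :=
  dependency_name ≠ ""
instance (lines : List String) (dependency_name : String) : Decidable (Pre_find_insertion_index_py lines dependency_name) := by unfold Pre_find_insertion_index_py; infer_instance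
def pvWitness_find_insertion_index_py : List String × String := (["[requires]", "grpc/1.0"], "grpc")

-- For a nonempty dependency_name that is a prefix of "[requires]" (e.g. "[") in a file with
-- a requires section, A treats the header line itself as a dependency match and returns the
-- header's own index with replace=True, while B ignores header lines and returns the line
-- after the last header with replace=False — the intended insertion point.
def D_find_insertion_index_py (lines : List String) (dependency_name : String) : Prop :=
  dependency_name ≠ "" ∧
  PySem.Str.startswith "[requires]" dependency_name = true ∧
  lines.any (fun l => PySem.Str.strip l == "[requires]") = true
instance (lines : List String) (dependency_name : String) : Decidable (D_find_insertion_index_py lines dependency_name) := by unfold D_find_insertion_index_py; infer_instance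

def Spec_find_insertion_index_py (lines : List String) (dependency_name : String) (out : Int × Bool × Bool) : Prop := ¬ D_find_insertion_index_py lines dependency_name → out = find_insertion_index_py_alt lines dependency_name
instance (lines : List String) (dependency_name : String) (out : Int × Bool × Bool) : Decidable (Spec_find_insertion_index_py lines dependency_name out) := by unfold Spec_find_insertion_index_py; infer_instance

def pvDiffWitness_find_insertion_index_py : List String × String := (["[requires]"], "[")
def pvDiffWitnessOut_find_insertion_index_py : (Int × Bool × Bool) × (Int × Bool × Bool) := ((0, true, true), (1, false, true))

-- ===== CLAIM (what is proved, stated in full; the proofs are below) =====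
def Claim_unchanged_find_insertion_index_py : Prop := ∀ (lines : List String) (dependency_name : String), Dom_find_insertion_index_py lines dependency_name → Pre_find_insertion_index_py lines dependency_name → Spec_find_insertion_index_py lines dependency_name (find_insertion_index_py lines dependency_name)
def Claim_changed_find_insertion_index_py : Prop := Dom_find_insertion_index_py (pvDiffWitness_find_insertion_index_py.1) (pvDiffWitness_find_insertion_index_py.2) ∧ Pre_find_insertion_index_py (pvDiffWitness_find_insertion_index_py.1) (pvDiffWitness_find_insertion_index_py.2) ∧ D_find_insertion_index_py (pvDiffWitness_find_insertion_index_py.1) (pvDiffWitness_find_insertion_index_py.2) ∧ find_insertion_index_py (pvDiffWitness_find_insertion_index_py.1) (pvDiffWitness_find_insertion_index_py.2) = pvDiffWitnessOut_find_insertion_index_py.1 ∧ find_insertion_index_py_alt (pvDiffWitness_find_insertion_index_py.1) (pvDiffWitness_find_insertion_index_py.2) = pvDiffWitnessOut_find_insertion_index_py.2 ∧ pvDiffWitnessOut_find_insertion_index_py.1 ≠ pvDiffWitnessOut_find_insertion_index_py.2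
def Claim_exact_find_insertion_index_py : Prop := ∀ (lines : List String) (dependency_name : String), Dom_find_insertion_index_py lines dependency_name → Pre_find_insertion_index_py lines dependency_name → D_find_insertion_index_py lines dependency_name → find_insertion_index_py lines dependency_name ≠ find_insertion_index_py_alt lines dependency_name

-- ===== LEMMAS AND PROOFS =====

-- A's loop on pre-stripped lines (proof-side mirror of aLoop without the per-line strip)
def aLoopS (dep : String) : List String → Int → (Option Int × Bool × Bool × Bool) → Option Int × Bool × Bool × Bool
  | [], _, st => st
  | s :: rest, i, (found, replace, inReq, hasReq) =>
    let (found, inReq, hasReq) :=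
      if s == "[requires]" then ((some (i+1) : Option Int), true, true)
      else if inReq && PySem.Str.startswith s "[" then (found, false, hasReq)
      else (found, inReq, hasReq)
    let (found, replace) :=
      if inReq && (!(s == "")) && PySem.Str.startswith s dep
      then ((some i : Option Int), true)
      else (found, replace)
    aLoopS dep rest (i+1) (found, replace, inReq, hasReq)

theorem len_pos_iff_ne_empty (s : String) :
    (decide (0 < PySem.Str.len s)) = (!(s == "")) := by
  by_cases h : s = ""
  · subst h; decide
  · have h2 : s.toList ≠ [] := by
      intro hn
      apply h
      calc s = String.ofList s.toList := String.ofList_toList.symm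
        _ = String.ofList [] := by rw [hn]
        _ = "" := rfl
    have h3 : 0 < s.length := by simpa using List.length_pos_of_ne_nil h2
    simp [h, PySem.Str.len_eq, h3]

theorem aLoop_eq_aLoopS (dep : String) : ∀ (L : List String) (i : Int) (st : Option Int × Bool × Bool × Bool),
    aLoop dep L i st = aLoopS dep (L.map PySem.Str.strip) i st := by
  intro L
  induction L with
  | nil => intro i st; rfl
  | cons l rest ih =>
    intro i st
    obtain ⟨f, r, q, h⟩ := st
    simp only [aLoop, aLoopS, List.map_cons, len_pos_iff_ne_empty]
    exact ih _ _

-- proof-side section sweep: matches, index after the body, and the remaining lines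
def bBody (dep : String) : List String → Int → List Int → List Int × Int × List String
  | [], j, ms => (ms, j, [])
  | s :: rest, j, ms =>
    if PySem.Str.startswith s "[" then (ms, j, s :: rest)
    else bBody dep rest (j+1)
      (if (!(s == "")) && PySem.Str.startswith s dep then ms ++ [j] else ms)

theorem bBody_len_le (dep : String) : ∀ (L : List String) (j : Int) (ms : List Int),
    (bBody dep L j ms).2.2.length ≤ L.length := by
  intro L
  induction L with
  | nil => intro j ms; simp [bBody]
  | cons s rest ih =>
    intro j ms
    rw [bBody]
    split
    · simp
    · exact le_trans (ih _ _) (Nat.le_succ _)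

theorem bBody_acc (dep : String) : ∀ (L : List String) (j : Int) (ms : List Int),
    bBody dep L j ms = ((ms ++ (bBody dep L j []).1, (bBody dep L j []).2)) := by
  intro L
  induction L with
  | nil => intro j ms; simp [bBody]
  | cons s rest ih =>
    intro j ms
    rw [bBody, bBody]
    cases hb : PySem.Str.startswith s "[" with
    | true => simp
    | false =>
      simp only [Bool.false_eq_true, if_false, List.nil_append]
      cases hc : ((!(s == "")) && PySem.Str.startswith s dep) with
      | true =>
        simp only [if_true]
        rw [ih (j+1) (ms ++ [j]), ih (j+1) [j]]
        simp
      | false =>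
        simp only [Bool.false_eq_true, if_false]
        rw [ih (j+1) ms]

-- A's in-section processing equals one bBody sweep
theorem inside_eq (dep : String) : ∀ (L : List String) (j f : Int) (r : Bool),
    aLoopS dep L j (some f, r, true, true)
      = aLoopS dep (bBody dep L j []).2.2 (bBody dep L j []).2.1
          (some ((bBody dep L j []).1.getLast?.getD f), r || !(bBody dep L j []).1.isEmpty, true, true) := by
  intro L
  induction L with
  | nil =>
    intro j f r
    simp only [bBody, List.getLast?_nil, Option.getD_none, List.isEmpty_nil, Bool.not_true,
      Bool.or_false]
  | cons s rest ih =>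
    intro j f r
    rw [bBody]
    cases hb : PySem.Str.startswith s "[" with
    | true =>
      simp only [if_true, List.getLast?_nil, Option.getD_none, List.isEmpty_nil, Bool.not_true,
        Bool.or_false]
    | false =>
      have hsreq : (s == "[requires]") = false := by
        cases hq : (s == "[requires]") with
        | false => rfl
        | true =>
          exfalso
          have hse : s = "[requires]" := by simpa using hq
          rw [hse] at hb
          exact absurd hb (by decide)
      simp only [Bool.false_eq_true, if_false, List.nil_append]
      cases hc : ((!(s == "")) && PySem.Str.startswith s dep) with
      | true =>
        simp only [aLoopS, hsreq, Bool.false_eq_true, if_false, hb, Bool.true_and, hc, if_true]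
        rw [ih (j+1) j true, bBody_acc dep rest (j+1) [j]]
        have hg : (([j] ++ (bBody dep rest (j+1) []).1).getLast?).getD f
            = ((bBody dep rest (j+1) []).1.getLast?).getD j := by
          rw [List.getLast?_append]
          cases (bBody dep rest (j+1) []).1.getLast? <;> simp
        rw [hg]
        simp
      | false =>
        simp only [aLoopS, hsreq, Bool.false_eq_true, if_false, hb, Bool.true_and, hc]
        exact ih (j+1) f r

-- projection to the components of A's state that determine the output
def outTriple (st : Option Int × Bool × Bool × Bool) : Option Int × Bool × Bool := (st.1, st.2.1, st.2.2.2)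

-- on a '[' line (or end of file) the in-section and out-of-section states behave alike
theorem mode_eq (dep : String) : ∀ (L : List String) (j : Int) (f : Option Int) (r : Bool),
    (∀ s rest, L = s :: rest → PySem.Str.startswith s "[" = true) →
    outTriple (aLoopS dep L j (f, r, true, true)) = outTriple (aLoopS dep L j (f, r, false, true)) := by
  intro L
  cases L with
  | nil => intro j f r _; rfl
  | cons s rest =>
    intro j f r hh
    have hs : PySem.Str.startswith s "[" = true := hh s rest rfl
    have heq : aLoopS dep (s :: rest) j (f, r, true, true)
        = aLoopS dep (s :: rest) j (f, r, false, true) := by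
      cases hr : (s == "[requires]") with
      | true => simp only [aLoopS, hr, if_true]
      | false =>
        simp only [aLoopS, hr, hs, Bool.false_eq_true, if_false, Bool.true_and, Bool.false_and,
          if_true]
    rw [heq]

-- the line bBody stops on (if any) starts with '['
theorem bBody_stop (dep : String) : ∀ (L : List String) (j : Int) (ms : List Int)
    (s' : String) (rest'' : List String),
    (bBody dep L j ms).2.2 = s' :: rest'' → PySem.Str.startswith s' "[" = true := by
  intro L
  induction L with
  | nil => intro j ms s' r h; simp [bBody] at h
  | cons s rest ih =>
    intro j ms s' r h
    rw [bBody] at h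
    cases hb : PySem.Str.startswith s "[" with
    | true =>
      rw [hb, if_pos rfl] at h
      have h2 : s :: rest = s' :: r := h
      injection h2 with h3 _
      exact h3 ▸ hb
    | false =>
      rw [hb] at h
      simp only [Bool.false_eq_true, if_false] at h
      exact ih _ _ _ _ h

-- a line that does not start with '[' is not the header
theorem not_header_of_not_bracket (s : String) (hb : PySem.Str.startswith s "[" = false) :
    (s == "[requires]") = false := by
  cases hq : (s == "[requires]") with
  | false => rfl
  | true =>
    exfalso
    have hse : s = "[requires]" := by simpa using hq
    rw [hse] at hb
    exact absurd hb (by decide)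

-- B's _section_matches is exactly bBody's match list
theorem secMatches_eq_bBody (dep : String) : ∀ (L : List String) (j : Int),
    sectionMatchesAlt dep L j = (bBody dep L j []).1 := by
  intro L
  induction L with
  | nil => intro j; simp [sectionMatchesAlt, bBody]
  | cons s rest ih =>
    intro j
    rw [sectionMatchesAlt, bBody]
    cases hb : PySem.Str.startswith s "[" with
    | true => simp
    | false =>
      simp only [Bool.false_eq_true, if_false, List.nil_append]
      cases hc : ((!(s == "")) && PySem.Str.startswith s dep) with
      | true =>
        simp only [if_true]
        rw [ih (j+1), bBody_acc dep rest (j+1) [j]]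
        simp
      | false =>
        simp only [Bool.false_eq_true, if_false]
        exact ih (j+1)

-- a section body contains no header, so altSections can jump over it
theorem altSections_skip_body (dep : String) : ∀ (L : List String) (j : Int),
    altSections dep L j = altSections dep (bBody dep L j []).2.2 (bBody dep L j []).2.1 := by
  intro L
  induction L with
  | nil => intro j; simp [bBody]
  | cons s rest ih =>
    intro j
    rw [bBody]
    cases hb : PySem.Str.startswith s "[" with
    | true => simp
    | false =>
      simp only [Bool.false_eq_true, if_false, List.nil_append]
      rw [altSections, not_header_of_not_bracket s hb]
      simp only [Bool.false_eq_true, if_false]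
      cases hc : ((!(s == "")) && PySem.Str.startswith s dep) with
      | true =>
        simp only [if_true]
        rw [bBody_acc dep rest (j+1) [j]]
        simpa using ih (j+1)
      | false =>
        simp only [Bool.false_eq_true, if_false]
        exact ih (j+1)

-- B's answer read off the sections list, with the incoming A-state folded in
def altOut (dep : String) (L : List String) (i : Int) (fo : Option Int) (r : Bool) (h : Bool) :
    Option Int × Bool × Bool :=
  match (altSections dep L i).getLast? with
  | none => (fo, r, h)
  | some (hd, ms) =>
      (some (ms.getLast?.getD (hd + 1)), r || (altSections dep L i).any (fun p => !p.2.isEmpty), true)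

-- main correspondence: if dep is not a prefix of the header, A's scan computes altOut
theorem main_fuel (dep : String) (hpfx : PySem.Str.startswith "[requires]" dep = false) :
    ∀ (n : Nat) (L : List String), L.length ≤ n →
    ∀ (i : Int) (fo : Option Int) (r h : Bool),
    outTriple (aLoopS dep L i (fo, r, false, h)) = altOut dep L i fo r h := by
  intro n
  induction n with
  | zero =>
    intro L hL i fo r h
    have : L = [] := List.eq_nil_of_length_eq_zero (Nat.le_zero.mp hL)
    subst this
    simp [aLoopS, outTriple, altOut, altSections]
  | succ n ih =>
    intro L hL i fo r h
    cases L with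
    | nil => simp [aLoopS, outTriple, altOut, altSections]
    | cons s rest =>
      have hL' : rest.length ≤ n := Nat.le_of_succ_le_succ (by simpa using hL)
      cases hs : (s == "[requires]") with
      | false =>
        simp only [aLoopS, hs, Bool.false_eq_true, if_false, Bool.false_and]
        have halt : altOut dep (s :: rest) i fo r h = altOut dep rest (i+1) fo r h := by
          unfold altOut
          rw [altSections, hs]
          simp
        rw [halt]
        exact ih rest hL' (i+1) fo r h
      | true =>
        have hse : s = "[requires]" := by simpa using hs
        subst hse
        -- A: header sets found = i+1, enters the section; no self-match since hpfx
        have hstep : aLoopS dep ("[requires]" :: rest) i (fo, r, false, h)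
            = aLoopS dep rest (i+1) (some (i+1), r, true, true) := by
          simp only [aLoopS, hpfx]
          norm_num
        rw [hstep, inside_eq dep rest (i+1) (i+1) r]
        rw [mode_eq dep _ _ _ _ (fun s' r'' hh => bBody_stop dep rest (i+1) [] s' r'' hh)]
        have hlen : (bBody dep rest (i+1) []).2.2.length ≤ n :=
          le_trans (bBody_len_le dep rest (i+1) []) hL'
        rw [ih _ hlen _ _ _ _]
        -- B: the sections list gains the head (i, matches of this section)
        have hsecs : altSections dep ("[requires]" :: rest) i
            = (i, (bBody dep rest (i+1) []).1)
              :: altSections dep (bBody dep rest (i+1) []).2.2 (bBody dep rest (i+1) []).2.1 := by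
          rw [altSections]
          simp only [BEq.rfl, if_true]
          rw [secMatches_eq_bBody, altSections_skip_body]
        unfold altOut
        rw [hsecs]
        cases ht : (altSections dep (bBody dep rest (i+1) []).2.2 (bBody dep rest (i+1) []).2.1).getLast? with
        | none =>
          have htn : altSections dep (bBody dep rest (i+1) []).2.2 (bBody dep rest (i+1) []).2.1 = [] :=
            List.getLast?_eq_none_iff.mp ht
          rw [htn]
          simp [Bool.or_comm]
        | some p =>
          obtain ⟨hd, ms2⟩ := p
          have htne : altSections dep (bBody dep rest (i+1) []).2.2 (bBody dep rest (i+1) []).2.1 ≠ [] := by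
            intro hn; rw [hn] at ht; simp at ht
          have hcons : ((i, (bBody dep rest (i+1) []).1)
              :: altSections dep (bBody dep rest (i+1) []).2.2 (bBody dep rest (i+1) []).2.1).getLast?
              = some (hd, ms2) := by
            cases hT : altSections dep (bBody dep rest (i+1) []).2.2 (bBody dep rest (i+1) []).2.1 with
            | nil => exact absurd hT htne
            | cons y ys => rw [hT] at ht; simpa [List.getLast?_cons_cons] using ht
          rw [hcons]
          simp [Bool.or_assoc]

-- with no header line, A's scan keeps its state and B's sections list is empty
theorem aLoopS_no_header (dep : String) : ∀ (L : List String),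
    (∀ s ∈ L, (s == "[requires]") = false) →
    ∀ (i : Int) (fo : Option Int) (r h : Bool),
    aLoopS dep L i (fo, r, false, h) = (fo, r, false, h) := by
  intro L
  induction L with
  | nil => intro _ i fo r h; rfl
  | cons s rest ih =>
    intro hall i fo r h
    have hs := hall s (List.mem_cons_self)
    simp only [aLoopS, hs, Bool.false_eq_true, if_false, Bool.false_and]
    exact ih (fun t ht => hall t (List.mem_cons_of_mem s ht)) (i+1) fo r h

theorem altSections_no_header (dep : String) : ∀ (L : List String),
    (∀ s ∈ L, (s == "[requires]") = false) →
    ∀ (i : Int), altSections dep L i = [] := by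
  intro L
  induction L with
  | nil => intro _ i; rfl
  | cons s rest ih =>
    intro hall i
    rw [altSections, hall s (List.mem_cons_self)]
    simp only [Bool.false_eq_true, if_false]
    exact ih (fun t ht => hall t (List.mem_cons_of_mem s ht)) (i+1)

theorem altSections_ne_nil (dep : String) : ∀ (L : List String),
    (∃ s ∈ L, s = "[requires]") → ∀ (i : Int), altSections dep L i ≠ [] := by
  intro L
  induction L with
  | nil => intro ⟨s, hm, _⟩; simp at hm
  | cons s rest ih =>
    intro ⟨t, hm, ht⟩ i
    rw [altSections]
    cases hs : (s == "[requires]") with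
    | true => simp
    | false =>
      simp only [Bool.false_eq_true, if_false]
      rcases List.mem_cons.mp hm with hts | htr
      · exfalso; rw [← hts, ht] at hs; simp at hs
      · exact ih ⟨t, htr, ht⟩ (i+1)

-- once replace is true in A's state it stays true
theorem aLoopS_replace_sticky (dep : String) : ∀ (L : List String) (i : Int)
    (st : Option Int × Bool × Bool × Bool), st.2.1 = true → (aLoopS dep L i st).2.1 = true := by
  intro L
  induction L with
  | nil => intro i st h; exact h
  | cons s rest ih =>
    intro i st h
    obtain ⟨fo, r, q, hq⟩ := st
    simp only at h
    subst h
    simp only [aLoopS]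
    apply ih
    split_ifs <;> rfl

-- with dep a prefix of the header and a header present, A sets replace
theorem aLoopS_replace_true (dep : String) (hpfx : PySem.Str.startswith "[requires]" dep = true) :
    ∀ (L : List String), (∃ s ∈ L, s = "[requires]") →
    ∀ (i : Int) (st : Option Int × Bool × Bool × Bool),
    (aLoopS dep L i st).2.1 = true := by
  intro L
  induction L with
  | nil => intro ⟨s, hm, _⟩; simp at hm
  | cons s rest ih =>
    intro ⟨t, hm, ht⟩ i st
    obtain ⟨fo, r, q, h⟩ := st
    rcases List.mem_cons.mp hm with hts | htr
    · have hse : s = "[requires]" := hts ▸ ht ▸ rfl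
      subst hse
      have hcond : (true && (!(("[requires]" : String) == "")) && PySem.Str.startswith "[requires]" dep) = true := by
        rw [hpfx]; decide
      simp only [aLoopS, BEq.rfl, if_true, hcond]
      exact aLoopS_replace_sticky dep rest (i+1) _ rfl
    · simp only [aLoopS]
      exact ih ⟨t, htr, ht⟩ _ _

-- a nonempty prefix of "[requires]" starts with '[': any line starting with it starts with '['
theorem startswith_bracket_of_dep (dep : String) (hne : dep ≠ "")
    (hpfx : PySem.Str.startswith "[requires]" dep = true) (s : String)
    (hsd : PySem.Str.startswith s dep = true) : PySem.Str.startswith s "[" = true := by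
  simp only [PySem.Str.startswith_eq] at hpfx hsd ⊢
  rw [PySem.Chars.startswith_iff] at hpfx hsd ⊢
  have hdl : dep.toList ≠ [] := by
    intro hn
    apply hne
    calc dep = String.ofList dep.toList := String.ofList_toList.symm
      _ = String.ofList [] := by rw [hn]
      _ = "" := rfl
  cases hd : dep.toList with
  | nil => exact absurd hd hdl
  | cons c cs =>
    have hreq : ("[requires]" : String).toList = ['[','r','e','q','u','i','r','e','s',']'] := rfl
    rw [hd, hreq] at hpfx
    obtain ⟨t, ht⟩ := hpfx
    have hc : c = '[' := by
      have := ht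
      simp only [List.cons_append] at this
      injection this with h1 _
    have h1 : ("[" : String).toList <+: c :: cs := by
      rw [hc]
      exact ⟨cs, rfl⟩
    rw [hd] at hsd
    exact h1.trans hsd

-- under D_, no section body line matches, so every section's match list is empty
theorem secMatches_nil (dep : String) (hne : dep ≠ "")
    (hpfx : PySem.Str.startswith "[requires]" dep = true) :
    ∀ (L : List String) (j : Int), sectionMatchesAlt dep L j = [] := by
  intro L
  induction L with
  | nil => intro j; rfl
  | cons s rest ih =>
    intro j
    rw [sectionMatchesAlt]
    cases hb : PySem.Str.startswith s "[" with
    | true => simp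
    | false =>
      simp only [Bool.false_eq_true, if_false]
      cases hc : PySem.Str.startswith s dep with
      | true =>
        exfalso
        have := startswith_bracket_of_dep dep hne hpfx s hc
        rw [this] at hb
        simp at hb
      | false =>
        simp only [Bool.and_false, Bool.false_eq_true, if_false]
        exact ih (j+1)

theorem altSections_any_false (dep : String) (hne : dep ≠ "")
    (hpfx : PySem.Str.startswith "[requires]" dep = true) :
    ∀ (L : List String) (i : Int),
    (altSections dep L i).any (fun p => !p.2.isEmpty) = false := by
  intro L
  induction L with
  | nil => intro i; rfl
  | cons s rest ih =>
    intro i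
    rw [altSections]
    cases hs : (s == "[requires]") with
    | true =>
      simp only [if_true, List.any_cons]
      rw [secMatches_nil dep hne hpfx]
      simpa using ih (i+1)
    | false =>
      simp only [Bool.false_eq_true, if_false]
      exact ih (i+1)

-- header presence transferred from lines to the stripped list
theorem header_mem_stripped (lines : List String)
    (h : lines.any (fun l => PySem.Str.strip l == "[requires]") = true) :
    ∃ s ∈ lines.map PySem.Str.strip, s = "[requires]" := by
  simp only [List.any_eq_true, beq_iff_eq] at h
  obtain ⟨l, hl, he⟩ := h
  exact ⟨PySem.Str.strip l, List.mem_map_of_mem hl, he⟩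

theorem no_header_stripped (lines : List String)
    (h : lines.any (fun l => PySem.Str.strip l == "[requires]") = false) :
    ∀ s ∈ lines.map PySem.Str.strip, (s == "[requires]") = false := by
  intro s hs
  obtain ⟨l, hl, he⟩ := List.mem_map.mp hs
  cases hq : (s == "[requires]") with
  | false => rfl
  | true =>
    exfalso
    have : lines.any (fun l => PySem.Str.strip l == "[requires]") = true := by
      simp only [List.any_eq_true]
      exact ⟨l, hl, by rw [he, hq]⟩
    simp [this] at h

-- ===== VERDICT (by name: the statement is the Claim_ definition above) =====
theorem find_insertion_index_py_spec : Claim_unchanged_find_insertion_index_py := by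
  intro lines dep _ hpre hnd
  simp only [find_insertion_index_py, find_insertion_index_py_alt]
  rw [aLoop_eq_aLoopS]
  cases hany : lines.any (fun l => PySem.Str.strip l == "[requires]") with
  | false =>
    rw [aLoopS_no_header dep _ (no_header_stripped lines hany),
      altSections_no_header dep _ (no_header_stripped lines hany) 0]
    rfl
  | true =>
    have hpfx : PySem.Str.startswith "[requires]" dep = false := by
      cases hp : PySem.Str.startswith "[requires]" dep with
      | false => rfl
      | true => exact absurd ⟨hpre, hp, hany⟩ hnd
    have hm := main_fuel dep hpfx (lines.map PySem.Str.strip).length _ le_rfl 0 none false false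
    unfold altOut at hm
    have hne := altSections_ne_nil dep _ (header_mem_stripped lines hany) 0
    obtain ⟨p, hp⟩ := Option.ne_none_iff_exists'.mp (mt List.getLast?_eq_none_iff.mp hne)
    obtain ⟨hd, ms⟩ := p
    rw [hp] at hm ⊢
    have h1 : (aLoopS dep (lines.map PySem.Str.strip) 0 (none, false, false, false)).1
        = some (ms.getLast?.getD (hd + 1)) := congrArg (·.1) hm
    have h2 : (aLoopS dep (lines.map PySem.Str.strip) 0 (none, false, false, false)).2.1
        = (altSections dep (lines.map PySem.Str.strip) 0).any (fun p => !p.2.isEmpty) := by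
      have := congrArg (·.2.1) hm; simpa using this
    have h3 : (aLoopS dep (lines.map PySem.Str.strip) 0 (none, false, false, false)).2.2.2 = true :=
      congrArg (·.2.2) hm ▸ rfl
    rw [h1, h2, h3]
    simp

theorem find_insertion_index_py_changed : Claim_changed_find_insertion_index_py := by
  unfold Claim_changed_find_insertion_index_py; decide

theorem find_insertion_index_py_tight : Claim_exact_find_insertion_index_py := by
  intro lines dep _ _ hD heq
  obtain ⟨hne, hpfx, hany⟩ := hD
  have hA : (find_insertion_index_py lines dep).2.1 = true := by
    unfold find_insertion_index_py
    rw [aLoop_eq_aLoopS]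
    exact aLoopS_replace_true dep hpfx _ (header_mem_stripped lines hany) 0 _
  have hB : (find_insertion_index_py_alt lines dep).2.1 = false := by
    unfold find_insertion_index_py_alt
    have hnn := altSections_ne_nil dep _ (header_mem_stripped lines hany) 0
    obtain ⟨p, hp⟩ := Option.ne_none_iff_exists'.mp (mt List.getLast?_eq_none_iff.mp hnn)
    obtain ⟨hd, ms⟩ := p
    simp only [hp]
    exact altSections_any_false dep hne hpfx _ 0
  rw [heq, hB] at hA
  exact Bool.false_ne_true hA
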